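-- pv_equiv track=rewrite | github.com/ppaperso/HeelonVault | src/ui/password_form_utils.py | _password_policy_checklist_text
-- ===== SOURCE A (Python) =====
-- def _password_policy_checklist_text(password: str) -> str:
--     has_lower = any(char.islower() for char in password)
--     has_upper = any(char.isupper() for char in password)
--     has_digit = any(char.isdigit() for char in password)
--     has_special = any(not char.isalnum() and not char.isspace() for char in password)
--
--     checklist = [
--         f"{'✅' if len(password) >= 10 else '•'} 10+ characters",
--         f"{'✅' if has_upper else '•'} 1 uppercase",
--         f"{'✅' if has_lower else '•'} 1 lowercase",
--         f"{'✅' if has_digit else '•'} 1 digit",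
--         f"{'✅' if has_special else '•'} 1 symbol",
--     ]
--     return " | ".join(checklist)
-- ===== SOURCE B (Python) =====
-- def _password_policy_checklist_text(password: str) -> str:
--     has_lower = has_upper = has_digit = has_special = False
--     for char in password:
--         if has_lower and has_upper and has_digit and has_special:
--             break
--         if char.islower():
--             has_lower = True
--         if char.isupper():
--             has_upper = True
--         if char.isdigit():
--             has_digit = True
--         if not char.isalnum() and not char.isspace():
--             has_special = True
--
--     checklist = [
--         f"{'✅' if len(password) >= 10 else '•'} 10+ characters",
--         f"{'✅' if has_upper else '•'} 1 uppercase",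
--         f"{'✅' if has_lower else '•'} 1 lowercase",
--         f"{'✅' if has_digit else '•'} 1 digit",
--         f"{'✅' if has_special else '•'} 1 symbol",
--     ]
--     return " | ".join(checklist)
-- ===== Notes on version B (the rewrite author's own statement) =====
-- stated objective: alternative
-- what changed: replaces the four separate any() scans of the password with a single pass that maintains all four character-class flags at once and breaks early when all are set
import Mathlib
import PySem

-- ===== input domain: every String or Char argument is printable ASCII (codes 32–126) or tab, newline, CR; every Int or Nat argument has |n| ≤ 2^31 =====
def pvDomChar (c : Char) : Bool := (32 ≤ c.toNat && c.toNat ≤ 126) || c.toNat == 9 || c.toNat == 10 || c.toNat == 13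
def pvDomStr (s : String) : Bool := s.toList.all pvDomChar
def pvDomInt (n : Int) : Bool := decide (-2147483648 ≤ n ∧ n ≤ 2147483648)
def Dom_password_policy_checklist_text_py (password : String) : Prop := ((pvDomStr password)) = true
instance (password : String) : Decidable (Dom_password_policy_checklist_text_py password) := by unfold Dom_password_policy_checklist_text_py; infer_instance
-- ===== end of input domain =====

-- ===== PORT A =====
-- A = B outside any stated difference: B computes the same checklist with one
-- pass over the characters instead of four any() scans (objective: alternative).
def password_policy_checklist_text_py (password : String) : String :=
  let cs := password.toList
  let has_lower := cs.any (fun c => PySem.Chars.islower c)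
  let has_upper := cs.any (fun c => PySem.Chars.isupper c)
  let has_digit := cs.any (fun c => PySem.Chars.isdigit c)
  let has_special := cs.any (fun c => !PySem.Chars.isalnum c && !PySem.Chars.isspace c)
  let checklist :=
    [ (if 10 ≤ PySem.Chars.len cs then "✅" else "•") ++ " 10+ characters",
      (if has_upper then "✅" else "•") ++ " 1 uppercase",
      (if has_lower then "✅" else "•") ++ " 1 lowercase",
      (if has_digit then "✅" else "•") ++ " 1 digit",
      (if has_special then "✅" else "•") ++ " 1 symbol" ]
  PySem.Str.join " | " checklist

-- ===== PORT B =====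
-- single pass accumulating the four flags, breaking once all are set
def pvScanFlags : List Char → Bool → Bool → Bool → Bool → Bool × Bool × Bool × Bool
  | [], l, u, d, s => (l, u, d, s)
  | c :: cs, l, u, d, s =>
      if l && u && d && s then (l, u, d, s)
      else
        pvScanFlags cs (l || PySem.Chars.islower c) (u || PySem.Chars.isupper c)
          (d || PySem.Chars.isdigit c) (s || (!PySem.Chars.isalnum c && !PySem.Chars.isspace c))

def password_policy_checklist_text_py_alt (password : String) : String :=
  let cs := password.toList
  let flags := pvScanFlags cs false false false false
  let checklist :=
    [ (if 10 ≤ PySem.Chars.len cs then "✅" else "•") ++ " 10+ characters",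
      (if flags.2.1 then "✅" else "•") ++ " 1 uppercase",
      (if flags.1 then "✅" else "•") ++ " 1 lowercase",
      (if flags.2.2.1 then "✅" else "•") ++ " 1 digit",
      (if flags.2.2.2 then "✅" else "•") ++ " 1 symbol" ]
  PySem.Str.join " | " checklist

-- ===== PRECONDITION & SPEC =====
def Spec_password_policy_checklist_text_py (password : String) (out : String) : Prop := out = password_policy_checklist_text_py_alt password
instance (password : String) (out : String) : Decidable (Spec_password_policy_checklist_text_py password out) := by unfold Spec_password_policy_checklist_text_py; infer_instance

-- ===== CLAIM (what is proved, stated in full; the proofs are below) =====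
def Claim_equal_password_policy_checklist_text_py : Prop := ∀ (password : String), Dom_password_policy_checklist_text_py password → Spec_password_policy_checklist_text_py password (password_policy_checklist_text_py password)

-- ===== LEMMAS AND PROOFS =====
theorem pvScanFlags_eq (cs : List Char) (l u d s : Bool) :
    pvScanFlags cs l u d s =
      (l || cs.any (fun c => PySem.Chars.islower c),
       u || cs.any (fun c => PySem.Chars.isupper c),
       d || cs.any (fun c => PySem.Chars.isdigit c),
       s || cs.any (fun c => !PySem.Chars.isalnum c && !PySem.Chars.isspace c)) := by
  induction cs generalizing l u d s with
  | nil => simp [pvScanFlags]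
  | cons c cs ih =>
      simp only [pvScanFlags]
      split
      · rename_i h
        simp only [Bool.and_eq_true] at h
        obtain ⟨⟨⟨hl, hu⟩, hd⟩, hs⟩ := h
        simp [hl, hu, hd, hs]
      · rw [ih]
        simp [List.any_cons, Bool.or_assoc]

-- ===== VERDICT (by name: the statement is the Claim_ definition above) =====
theorem password_policy_checklist_text_py_spec : Claim_equal_password_policy_checklist_text_py := by
  intro password _
  unfold Spec_password_policy_checklist_text_py password_policy_checklist_text_py
    password_policy_checklist_text_py_alt
  simp only [pvScanFlags_eq, Bool.false_or]
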